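-- pv_equiv track=rewrite | github.com/sitandr/Poet-assistant-python-backend | translator.py | reversed_transcription_to_array
-- ===== SOURCE A (Python) =====
-- def reversed_transcription_to_array(w):
--     word = []
--     temp = []
--     num = None
--     for lett in w:
--         if lett in "'`*":
--             temp.append(lett)
--         elif lett in ''.join(map(str, range(10))):
--             num = (lett)
--         else:
--             if num:
--                 lett += num
--                 num = None
--             word.append([lett] + temp[::-1])
--             temp = []
--     return word
-- ===== SOURCE B (Python) =====
-- def reversed_transcription_to_array(w):
--     # Phase 1: tokenize into (prefix-of-specials, letter) pairs.
--     tokens = []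
--     pending = ""
--     for c in w:
--         if c in "'`*0123456789":
--             pending += c
--         else:
--             tokens.append((pending, c))
--             pending = ""
--     # Phase 2: build each group from its token (trailing pending is discarded).
--     result = []
--     for pre, letter in tokens:
--         digs = [d for d in pre if d.isdigit()]
--         mods = [m for m in reversed(pre) if m in "'`*"]
--         result.append([letter + (digs[-1] if digs else "")] + mods)
--     return result
-- ===== Notes on version B (the rewrite author's own statement) =====
-- stated objective: alternative
-- what changed: B replaces A's single stateful loop carrying temp/num accumulators with a two-phase decomposition: first tokenize the string into (specials-prefix, letter) pairs, then render each token independently by filtering its prefix for the modifiers and the last digit.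
import Mathlib
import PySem

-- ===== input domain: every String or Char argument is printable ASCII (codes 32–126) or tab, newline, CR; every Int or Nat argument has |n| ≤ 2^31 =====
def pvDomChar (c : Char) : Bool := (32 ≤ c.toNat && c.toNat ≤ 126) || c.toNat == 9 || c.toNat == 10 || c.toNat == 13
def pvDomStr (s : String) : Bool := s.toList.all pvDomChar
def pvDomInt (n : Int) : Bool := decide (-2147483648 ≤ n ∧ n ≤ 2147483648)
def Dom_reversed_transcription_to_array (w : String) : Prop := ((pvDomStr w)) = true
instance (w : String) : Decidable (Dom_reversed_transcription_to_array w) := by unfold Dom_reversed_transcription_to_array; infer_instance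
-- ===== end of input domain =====

-- B replaces A's single stateful loop (temp/num accumulators) by a two-phase tokenize-then-render
-- decomposition (objective: alternative); same return value, no side effects.

-- ===== PORT A =====
def pvModChars : List Char := ['\'', '`', '*']
def pvDigitChars : List Char := ['0','1','2','3','4','5','6','7','8','9']

-- one iteration of A's for-loop over (word, temp, num)
def pvStepA (st : List (List String) × List String × Option Char) (lett : Char) :
    List (List String) × List String × Option Char :=
  let word := st.1; let temp := st.2.1; let num := st.2.2
  if lett ∈ pvModChars then (word, temp ++ [String.ofList [lett]], num)
  else if lett ∈ pvDigitChars then (word, temp, some lett)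
  else
    match num with
    | some d => (word ++ [[String.ofList [lett, d]] ++ temp.reverse], [], none)
    | none   => (word ++ [[String.ofList [lett]] ++ temp.reverse], [], none)

def reversed_transcription_to_array (w : String) : List (List String) :=
  (w.toList.foldl pvStepA ([], [], none)).1

-- ===== PORT B =====
def pvSpecialChars : List Char := ['\'', '`', '*', '0','1','2','3','4','5','6','7','8','9']

-- phase 1: one iteration of B's tokenizing loop over (tokens, pending)
def pvTokStep (st : List (List Char × Char) × List Char) (c : Char) :
    List (List Char × Char) × List Char :=
  if c ∈ pvSpecialChars then (st.1, st.2 ++ [c]) else (st.1 ++ [(st.2, c)], [])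

-- phase 2: render one (prefix, letter) token into a group
-- (Char.isDigit is exact for Python's str.isdigit on the ASCII domain)
def pvAltModChars : List Char := ['\'', '`', '*']

def pvRenderTok (t : List Char × Char) : List String :=
  let digs := t.1.filter Char.isDigit
  let mods := t.1.reverse.filter (fun m => m ∈ pvAltModChars)
  (match digs.getLast? with
   | some d => String.ofList [t.2, d]
   | none   => String.ofList [t.2]) :: mods.map (fun m => String.ofList [m])

def reversed_transcription_to_array_alt (w : String) : List (List String) :=
  ((w.toList.foldl pvTokStep ([], [])).1).map pvRenderTok

-- ===== PRECONDITION & SPEC =====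
def Spec_reversed_transcription_to_array (w : String) (out : List (List String)) : Prop := out = reversed_transcription_to_array_alt w
instance (w : String) (out : List (List String)) : Decidable (Spec_reversed_transcription_to_array w out) := by unfold Spec_reversed_transcription_to_array; infer_instance

-- ===== CLAIM (what is proved, stated in full; the proofs are below) =====
def Claim_equal_reversed_transcription_to_array : Prop := ∀ (w : String), Dom_reversed_transcription_to_array w → Spec_reversed_transcription_to_array w (reversed_transcription_to_array w)

-- ===== LEMMAS AND PROOFS =====

-- A's temp and num, reconstructed from B's pending prefix
def pvModsOf (pending : List Char) : List String :=
  (pending.filter (fun m => m ∈ pvModChars)).map (fun m => String.ofList [m])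
def pvDigOf (pending : List Char) : Option Char :=
  (pending.filter Char.isDigit).getLast?

lemma pv_mod_not_digit {c : Char} (h : c ∈ pvModChars) : c.isDigit = false := by
  fin_cases h <;> decide

lemma pv_digit_iff {c : Char} : c ∈ pvDigitChars ↔ c.isDigit = true := by
  constructor
  · intro h; fin_cases h <;> decide
  · intro h
    simp only [Char.isDigit, Bool.and_eq_true, decide_eq_true_eq] at h
    obtain ⟨h1, h2⟩ := h
    have h1' : 48 ≤ c.toNat := UInt32.le_iff_toNat_le.mp h1
    have h2' : c.toNat ≤ 57 := UInt32.le_iff_toNat_le.mp h2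
    have he : ∀ (d : Char), c.toNat = d.toNat → c = d := fun d hd => Char.ext (UInt32.toNat_inj.mp hd)
    have : c.toNat = 48 ∨ c.toNat = 49 ∨ c.toNat = 50 ∨ c.toNat = 51 ∨ c.toNat = 52 ∨
        c.toNat = 53 ∨ c.toNat = 54 ∨ c.toNat = 55 ∨ c.toNat = 56 ∨ c.toNat = 57 := by omega
    simp only [pvDigitChars, List.mem_cons, List.not_mem_nil, or_false]
    rcases this with h|h|h|h|h|h|h|h|h|h
    · exact Or.inl (he '0' (by rw [h]; decide))
    · exact Or.inr (Or.inl (he '1' (by rw [h]; decide)))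
    · exact Or.inr (Or.inr (Or.inl (he '2' (by rw [h]; decide))))
    · exact Or.inr (Or.inr (Or.inr (Or.inl (he '3' (by rw [h]; decide)))))
    · exact Or.inr (Or.inr (Or.inr (Or.inr (Or.inl (he '4' (by rw [h]; decide))))))
    · exact Or.inr (Or.inr (Or.inr (Or.inr (Or.inr (Or.inl (he '5' (by rw [h]; decide)))))))
    · exact Or.inr (Or.inr (Or.inr (Or.inr (Or.inr (Or.inr (Or.inl (he '6' (by rw [h]; decide))))))))
    · exact Or.inr (Or.inr (Or.inr (Or.inr (Or.inr (Or.inr (Or.inr (Or.inl (he '7' (by rw [h]; decide)))))))))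
    · exact Or.inr (Or.inr (Or.inr (Or.inr (Or.inr (Or.inr (Or.inr (Or.inr (Or.inl (he '8' (by rw [h]; decide))))))))))
    · exact Or.inr (Or.inr (Or.inr (Or.inr (Or.inr (Or.inr (Or.inr (Or.inr (Or.inr (he '9' (by rw [h]; decide))))))))))

lemma pv_special_iff {c : Char} : c ∈ pvSpecialChars ↔ c ∈ pvModChars ∨ c ∈ pvDigitChars := by
  simp [pvSpecialChars, pvModChars, pvDigitChars]; tauto

-- main invariant: running A's loop from a state reconstructed from B's (tokens, pending)
-- yields the rendering of B's final token list
lemma pv_inv (cs : List Char) (tokens : List (List Char × Char)) (pending : List Char)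
    (word : List (List String)) (h : word = tokens.map pvRenderTok) :
    (cs.foldl pvStepA (word, pvModsOf pending, pvDigOf pending)).1
      = ((cs.foldl pvTokStep (tokens, pending)).1).map pvRenderTok := by
  induction cs generalizing tokens pending word with
  | nil => simpa using h
  | cons c rest ih =>
    by_cases hm : c ∈ pvModChars
    · have hs : c ∈ pvSpecialChars := pv_special_iff.mpr (Or.inl hm)
      have hd : c.isDigit = false := pv_mod_not_digit hm
      have e1 : pvModsOf pending ++ [String.ofList [c]] = pvModsOf (pending ++ [c]) := by
        simp [pvModsOf, List.filter_append, hm]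
      have e2 : pvDigOf pending = pvDigOf (pending ++ [c]) := by
        simp [pvDigOf, List.filter_append, hd]
      simp only [List.foldl_cons, pvStepA, pvTokStep, if_pos hm, if_pos hs]
      rw [e1, e2]
      exact ih tokens (pending ++ [c]) word h
    · by_cases hdg : c ∈ pvDigitChars
      · have hs : c ∈ pvSpecialChars := pv_special_iff.mpr (Or.inr hdg)
        have hd : c.isDigit = true := pv_digit_iff.mp hdg
        have e1 : pvModsOf pending = pvModsOf (pending ++ [c]) := by
          have : (c ∈ pvModChars) = False := by simp [hm]
          simp [pvModsOf, List.filter_append, this]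
        have e2 : some c = pvDigOf (pending ++ [c]) := by
          simp [pvDigOf, List.filter_append, hd]
        simp only [List.foldl_cons, pvStepA, pvTokStep, if_neg hm, if_pos hdg, if_pos hs]
        rw [e1, e2]
        exact ih tokens (pending ++ [c]) word h
      · have hs : c ∉ pvSpecialChars := fun hc => by
          rcases pv_special_iff.mp hc with h' | h' <;> [exact hm h'; exact hdg h']
        have egrp : (match pvDigOf pending with
            | some d => word ++ [[String.ofList [c, d]] ++ (pvModsOf pending).reverse]
            | none   => word ++ [[String.ofList [c]] ++ (pvModsOf pending).reverse])
            = (tokens ++ [(pending, c)]).map pvRenderTok := by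
          rw [h, List.map_append]
          simp only [List.map_cons, List.map_nil]
          have : pvRenderTok (pending, c) =
              (match pvDigOf pending with
               | some d => String.ofList [c, d]
               | none   => String.ofList [c]) :: (pvModsOf pending).reverse := by
            simp [pvRenderTok, pvDigOf, pvModsOf, pvAltModChars, pvModChars, List.filter_reverse, List.map_reverse]
          rw [this]
          cases pvDigOf pending <;> simp
        simp only [List.foldl_cons, pvStepA, pvTokStep, if_neg hm, if_neg hdg, if_neg hs]
        cases hdp : pvDigOf pending with
        | none =>
          rw [hdp] at egrp
          have := ih (tokens ++ [(pending, c)]) [] _ egrp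
          simpa [pvModsOf, pvDigOf] using this
        | some d =>
          rw [hdp] at egrp
          have := ih (tokens ++ [(pending, c)]) [] _ egrp
          simpa [pvModsOf, pvDigOf] using this

-- ===== VERDICT (by name: the statement is the Claim_ definition above) =====
theorem reversed_transcription_to_array_spec : Claim_equal_reversed_transcription_to_array := by
  intro w _
  unfold Spec_reversed_transcription_to_array reversed_transcription_to_array
    reversed_transcription_to_array_alt
  have := pv_inv w.toList [] [] [] rfl
  simpa [pvModsOf, pvDigOf] using this
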